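-- pv_equiv track=rewrite | github.com/equinegpt/tips-results-service | app/ui_helpers.py | decode_reasoning
-- ===== SOURCE A (Python) =====
-- def decode_reasoning(value: str | None) -> str:
--     """
--     Clean up old iReel text artefacts for display only:
--     - decode \u2014 etc to punctuation
--     - strip stray quotes/braces
--     - collapse \n into spaces
--     """
--     if not value:
--         return ""
--     text = str(value)
--
--     replacements = {
--         r"\\u2014": "—",
--         r"\\u2013": "–",
--         r"\\u2019": "’",
--         r"\\u002B": "+",
--         r"\\n": " ",
--         r"\\r": " ",
--         r"\\u0027": "'",   #  ← NEW: apostrophe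
--
--     }
--     for k, v in replacements.items():
--         text = text.replace(k, v)
--
--     # Trim junk from badly-serialised JSON
--     text = text.strip().strip('"}').strip()
--     return text
-- ===== SOURCE B (Python) =====
-- def decode_reasoning(value):
--     """
--     Same cleanup as A, but in ONE left-to-right scan over the string instead of
--     seven sequential str.replace passes: at each position try the escape tokens
--     in order; on a match emit the replacement and skip the token, else keep the
--     character. (Safe because no replacement text can re-form a token.)
--     """
--     if not value:
--         return ""
--     text = str(value)
--     reps = (
--         ("\\\\u2014", "\u2014"),
--         ("\\\\u2013", "\u2013"),
--         ("\\\\u2019", "\u2019"),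
--         ("\\\\u002B", "+"),
--         ("\\\\n", " "),
--         ("\\\\r", " "),
--         ("\\\\u0027", "'"),
--     )
--     out = []
--     i = 0
--     n = len(text)
--     while i < n:
--         for k, v in reps:
--             if text.startswith(k, i):
--                 out.append(v)
--                 i += len(k)
--                 break
--         else:
--             out.append(text[i])
--             i += 1
--     text = "".join(out)
--     return text.strip().strip('"}').strip()
-- ===== Notes on version B (the rewrite author's own statement) =====
-- stated objective: alternative
-- what changed: The seven sequential full-string str.replace passes are fused into one left-to-right scan that tries the escape tokens at each position and emits the replacement or the character (safe because no replacement text can re-form a token); the empty-guard and final strip tail are kept.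
import Mathlib
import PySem

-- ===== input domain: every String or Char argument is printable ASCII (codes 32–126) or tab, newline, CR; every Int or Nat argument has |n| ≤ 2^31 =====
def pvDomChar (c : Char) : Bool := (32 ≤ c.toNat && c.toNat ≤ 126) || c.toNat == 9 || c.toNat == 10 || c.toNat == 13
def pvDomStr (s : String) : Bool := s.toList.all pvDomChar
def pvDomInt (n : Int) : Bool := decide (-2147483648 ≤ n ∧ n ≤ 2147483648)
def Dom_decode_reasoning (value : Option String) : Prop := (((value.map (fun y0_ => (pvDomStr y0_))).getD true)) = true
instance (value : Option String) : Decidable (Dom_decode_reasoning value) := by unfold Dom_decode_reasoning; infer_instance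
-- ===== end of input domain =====

-- B fuses A's seven sequential str.replace passes into one left-to-right scan over the
-- string (alternative decomposition, not claimed faster); empty-guard and strip tail kept.

-- ===== PORT A =====
-- A: `if not value: return ""`, then seven sequential `text = text.replace(k, v)` passes in
-- dict order (the successive reassignments of `text` written as nested applications), then
-- `text.strip().strip('"}').strip()`.
def decode_reasoning (value : Option String) : String :=
  match value with
  | none => ""
  | some v =>
    if v = "" then ""
    else
      PySem.Str.strip (PySem.Str.stripChars (PySem.Str.strip
        (PySem.Str.replace (PySem.Str.replace (PySem.Str.replace (PySem.Str.replace (PySem.Str.replace (PySem.Str.replace (PySem.Str.replace v "\\\\u2014" "—") "\\\\u2013" "–") "\\\\u2019" "’") "\\\\u002B" "+") "\\\\n" " ") "\\\\r" " ") "\\\\u0027" "'")) "\"}")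

-- ===== PORT B =====
-- Source B's while-loop over the string (hand-ported position scan, exact: at each position the
-- tokens are tried in `reps` order; on a match the replacement is emitted and the token
-- skipped, else the character is kept).
def scanRepl : List Char → List Char
  | [] => []
  | c :: t =>
    if List.isPrefixOf ['\\','\\','u','2','0','1','4'] (c :: t) then '—' :: scanRepl (List.drop 6 t)
    else if List.isPrefixOf ['\\','\\','u','2','0','1','3'] (c :: t) then '–' :: scanRepl (List.drop 6 t)
    else if List.isPrefixOf ['\\','\\','u','2','0','1','9'] (c :: t) then '’' :: scanRepl (List.drop 6 t)
    else if List.isPrefixOf ['\\','\\','u','0','0','2','B'] (c :: t) then '+' :: scanRepl (List.drop 6 t)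
    else if List.isPrefixOf ['\\','\\','n'] (c :: t) then ' ' :: scanRepl (List.drop 2 t)
    else if List.isPrefixOf ['\\','\\','r'] (c :: t) then ' ' :: scanRepl (List.drop 2 t)
    else if List.isPrefixOf ['\\','\\','u','0','0','2','7'] (c :: t) then '\'' :: scanRepl (List.drop 6 t)
    else c :: scanRepl t
termination_by s => s.length
decreasing_by all_goals simp [List.length_drop]



def decode_reasoning_alt (value : Option String) : String :=
  match value with
  | none => ""
  | some v =>
    if v = "" then ""
    else
      PySem.Str.strip (PySem.Str.stripChars (PySem.Str.strip
        (String.ofList (scanRepl v.toList))) "\"}")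

-- ===== PRECONDITION & SPEC =====
def Spec_decode_reasoning (value : Option String) (out : String) : Prop := out = decode_reasoning_alt value
instance (value : Option String) (out : String) : Decidable (Spec_decode_reasoning value out) := by unfold Spec_decode_reasoning; infer_instance

-- ===== CLAIM (what is proved, stated in full; the proofs are below) =====
def Claim_equal_decode_reasoning : Prop := ∀ (value : Option String), Dom_decode_reasoning value → Spec_decode_reasoning value (decode_reasoning value)

-- ===== LEMMAS AND PROOFS =====

-- One str.replace pass, in a recursion shape convenient for induction (leftmost,
-- non-overlapping — the same result PySem.Chars.replace computes).
def rep (old new : List Char) : List Char → List Char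
  | [] => []
  | c :: t =>
    if List.isPrefixOf old (c :: t) then new ++ rep old new (List.drop (old.length - 1) t)
    else c :: rep old new t
termination_by s => s.length
decreasing_by all_goals simp [List.length_drop]


theorem go_eq_rep (old new : List Char) (h : old ≠ []) :
    ∀ fuel s acc, s.length ≤ fuel →
      PySem.Chars.replace.go old new fuel s acc = acc.reverse ++ rep old new s := by
  intro fuel
  induction fuel with
  | zero =>
    intro s acc hs
    have hnil : s = [] := List.eq_nil_of_length_eq_zero (Nat.le_zero.mp hs)
    subst hnil
    rw [PySem.Chars.replace.go, rep]
  | succ n ih =>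
    intro s acc hs
    cases s with
    | nil =>
      rw [PySem.Chars.replace.go]
      · rw [rep]
        simp
      · omega
    | cons c t =>
      obtain ⟨a, o, rfl⟩ : ∃ a o, old = a :: o := by
        cases old with
        | nil => exact absurd rfl h
        | cons a o => exact ⟨a, o, rfl⟩
      rw [PySem.Chars.replace.go]
      by_cases hp : List.isPrefixOf (a :: o) (c :: t) = true
      · simp only [hp, if_true]
        rw [ih _ _ (by simp at hs ⊢; omega), rep]
        simp [hp, List.drop_succ_cons]
      · rw [if_neg hp, ih _ _ (by simp at hs ⊢; omega)]
        conv_rhs => rw [rep]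
        simp [hp]


theorem replace_eq_rep (s old new : List Char) (h : old ≠ []) :
    PySem.Chars.replace s old new = rep old new s := by
  rw [PySem.Chars.replace]
  rw [if_neg (by simpa using h)]
  simpa using go_eq_rep old new h s.length s [] le_rfl


-- A's chain of replaces, as a fold over the token table.
def applyReps : List (List Char × List Char) → List Char → List Char
  | [], s => s
  | (k, v) :: rest, s => applyReps rest (rep k v s)


theorem applyReps_append (L1 L2 : List (List Char × List Char)) (s : List Char) :
    applyReps (L1 ++ L2) s = applyReps L2 (applyReps L1 s) := by
  induction L1 generalizing s with
  | nil => rfl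
  | cons kv L ih => obtain ⟨k, v⟩ := kv; simp [applyReps, ih]


theorem rep_nil (old new : List Char) : rep old new [] = [] := by rw [rep]


theorem applyReps_nil (L : List (List Char × List Char)) : applyReps L [] = [] := by
  induction L with
  | nil => rfl
  | cons kv L ih => obtain ⟨k, v⟩ := kv; simp [applyReps, rep_nil, ih]


-- the replacement table (A's seven passes in dict order = Source B's `reps` order), as char lists
def pvReps : List (List Char × List Char) :=
  [ (['\\','\\','u','2','0','1','4'], ['—']),
    (['\\','\\','u','2','0','1','3'], ['–']),
    (['\\','\\','u','2','0','1','9'], ['’']),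
    (['\\','\\','u','0','0','2','B'], ['+']),
    (['\\','\\','n'], [' ']),
    (['\\','\\','r'], [' ']),
    (['\\','\\','u','0','0','2','7'], ['\'']) ]



-- `Clash old p`: an occurrence of `old` cannot start at any position of `p`
-- (a mismatch is witnessed inside `p`, whatever follows it).
def Clash (old p : List Char) : Prop :=
  ∀ m < p.length, ∃ j < old.length, j + m < p.length ∧ old[j]? ≠ p[j + m]?


-- Bool twin of `Clash`, so concrete instances are provable by `decide` (no extra instances)
def clashb (old p : List Char) : Bool :=
  (List.range p.length).all fun m =>
    (List.range old.length).any fun j =>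
      decide (j + m < p.length) && decide (old[j]? ≠ p[j + m]?)

theorem clash_of_clashb {old p : List Char} (h : clashb old p = true) : Clash old p := by
  intro m hm
  have := (List.all_eq_true.mp h) m (List.mem_range.mpr hm)
  obtain ⟨j, hj, hb⟩ := List.any_eq_true.mp this
  simp only [Bool.and_eq_true, decide_eq_true_eq] at hb
  exact ⟨j, List.mem_range.mp hj, hb.1, hb.2⟩


theorem clash_shift {old : List Char} {c : Char} {p' : List Char}
    (h : Clash old (c :: p')) : Clash old p' := by
  intro m hm
  obtain ⟨j, hj, hjm, hne⟩ := h (m + 1) (by simp; omega)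
  exact ⟨j, hj, by simp at hjm; omega, by simpa [List.getElem?_cons_succ] using hne⟩


theorem not_prefix_of_clash {old p t : List Char} (h : Clash old p) (hp : p ≠ []) :
    ¬ List.isPrefixOf old (p ++ t) = true := by
  intro hpre
  obtain ⟨j, hj, hjp, hne⟩ := h 0 (by cases p <;> simp_all)
  apply hne
  have hpre' : old <+: p ++ t := by rwa [List.isPrefixOf_iff_prefix] at hpre
  obtain ⟨r, hr⟩ := hpre'
  have h1 : (old ++ r)[j]? = old[j]? := List.getElem?_append_left hj
  have h2 : (p ++ t)[j]? = p[j]? := List.getElem?_append_left (by simpa using hjp)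
  rw [hr] at h1
  simpa using h1.symm.trans h2


theorem pass_rep {old p : List Char} (new : List Char) (h : Clash old p) :
    ∀ t, rep old new (p ++ t) = p ++ rep old new t := by
  induction p with
  | nil => intro t; rfl
  | cons c p' ih =>
    intro t
    rw [show (c :: p') ++ t = c :: (p' ++ t) from rfl, rep,
      if_neg (by simpa using not_prefix_of_clash (t := t) h (by simp))]
    simpa using ih (clash_shift h) t


theorem rep_self {old : List Char} (new : List Char) (h : old ≠ []) (t : List Char) :
    rep old new (old ++ t) = new ++ rep old new t := by
  obtain ⟨a, o, rfl⟩ : ∃ a o, old = a :: o := by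
    cases old with
    | nil => exact absurd rfl h
    | cons a o => exact ⟨a, o, rfl⟩
  rw [show (a :: o) ++ t = a :: (o ++ t) from rfl, rep,
    if_pos (by rw [List.isPrefixOf_iff_prefix]; exact ⟨t, rfl⟩)]
  simp [List.drop_left']


theorem pass_applyReps {L : List (List Char × List Char)} {p : List Char}
    (h : ∀ kv ∈ L, Clash kv.1 p) (t : List Char) :
    applyReps L (p ++ t) = p ++ applyReps L t := by
  induction L generalizing t with
  | nil => rfl
  | cons kv L ih =>
    obtain ⟨k, v⟩ := kv
    simp only [applyReps]
    rw [pass_rep v (h (k, v) (by simp)), ih (fun kv hkv => h kv (by simp [hkv]))]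


-- a prefix containing no replacement character survives a `rep` pass backwards
theorem prefix_rep {old new : List Char} (hnew : new ≠ []) :
    ∀ t q, (∀ a ∈ q, a ∉ new) → List.isPrefixOf q (rep old new t) = true →
      List.isPrefixOf q t = true := by
  suffices H : ∀ n t q, t.length ≤ n → (∀ a ∈ q, a ∉ new) →
      List.isPrefixOf q (rep old new t) = true → List.isPrefixOf q t = true by
    intro t q hq hpre
    exact H t.length t q le_rfl hq hpre
  intro n
  induction n with
  | zero =>
    intro t q ht hq hpre
    have : t = [] := List.eq_nil_of_length_eq_zero (Nat.le_zero.mp ht)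
    subst this
    rwa [rep_nil] at hpre
  | succ n ih =>
    intro t q ht hq hpre
    cases t with
    | nil => rwa [rep_nil] at hpre
    | cons c t' =>
      by_cases hp : List.isPrefixOf old (c :: t') = true
      · cases q with
        | nil => simp [List.isPrefixOf]
        | cons a q' =>
          exfalso
          rw [rep, if_pos hp] at hpre
          obtain ⟨b, new', rfl⟩ : ∃ b new', new = b :: new' := by
            cases new with
            | nil => exact absurd rfl hnew
            | cons b new' => exact ⟨b, new', rfl⟩
          rw [List.isPrefixOf_iff_prefix] at hpre
          obtain ⟨r, hr⟩ := hpre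
          simp only [List.cons_append] at hr
          have hab : a = b := by
            have := congrArg (fun l => l[0]?) hr
            simpa using this
          exact hq a (by simp) (by simp [hab])
      · cases q with
        | nil => simp [List.isPrefixOf]
        | cons a q' =>
          rw [rep, if_neg hp] at hpre
          simp only [List.isPrefixOf, Bool.and_eq_true, beq_iff_eq] at hpre ⊢
          exact ⟨hpre.1, ih t' q' (by simp at ht; omega)
            (fun x hx => hq x (by simp [hx])) hpre.2⟩


theorem cons_applyReps :
    ∀ (L : List (List Char × List Char)) (c : Char) (t : List Char),
      (∀ kv ∈ L, kv.1 ≠ [] ∧ kv.2 ≠ []) →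
      (∀ kv ∈ L, ∀ kv' ∈ L, ∀ a ∈ kv.1.drop 1, a ∉ kv'.2) →
      (∀ kv ∈ L, ¬ List.isPrefixOf kv.1 (c :: t) = true) →
      applyReps L (c :: t) = c :: applyReps L t := by
  intro L
  induction L with
  | nil => intro c t _ _ _; rfl
  | cons kv L ih =>
    obtain ⟨k, v⟩ := kv
    intro c t hne hdis hnp
    simp only [applyReps]
    rw [show rep k v (c :: t) = c :: rep k v t from by
      rw [rep, if_neg (hnp (k, v) (by simp))]]
    rw [ih c (rep k v t)
      (fun kv hkv => hne kv (by simp [hkv]))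
      (fun kv hkv kv' hkv' => hdis kv (by simp [hkv]) kv' (by simp [hkv']))
      ?_]
    rintro ⟨kk, vv⟩ hkv hpre
    obtain ⟨k0, k0', rfl⟩ : ∃ a l, kk = a :: l := by
      rcases hx : kk with _ | ⟨a, l⟩
      · exact absurd hx (hne (kk, vv) (by simp [hkv])).1
      · exact ⟨a, l, rfl⟩
    simp only [List.isPrefixOf, Bool.and_eq_true, beq_iff_eq] at hpre
    obtain ⟨rfl, hpre2⟩ := hpre
    have hvne : v ≠ [] := (hne (k, v) (by simp)).2
    have hnov : ∀ a ∈ k0', a ∉ v := by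
      intro a ha
      exact hdis (k0 :: k0', vv) (by simp [hkv]) (k, v) (by simp) a (by simpa using ha)
    have := prefix_rep hvne t k0' hnov hpre2
    exact hnp (k0 :: k0', vv) (by simp [hkv])
      (by simp [List.isPrefixOf, this])


-- a matched token steps uniformly through the whole chain of replaces
theorem chain_match (A B : List (List Char × List Char)) (k v t : List Char)
    (hk : k ≠ []) (hA : ∀ kv ∈ A, Clash kv.1 k) (hB : ∀ kv ∈ B, Clash kv.1 v) :
    applyReps (A ++ (k, v) :: B) (k ++ t) = v ++ applyReps (A ++ (k, v) :: B) t := by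
  rw [applyReps_append, applyReps_append, pass_applyReps hA]
  simp only [applyReps]
  rw [rep_self v hk, pass_applyReps hB]


-- MAIN: A's chain of seven replaces equals B's single scan, on every char list.
theorem chain_eq_scan : ∀ cs : List Char, applyReps pvReps cs = scanRepl cs := by
  suffices H : ∀ n cs, cs.length ≤ n → applyReps pvReps cs = scanRepl cs from
    fun cs => H cs.length cs le_rfl
  intro n
  induction n with
  | zero =>
    intro cs hcs
    have : cs = [] := List.eq_nil_of_length_eq_zero (Nat.le_zero.mp hcs)
    subst this
    rw [applyReps_nil, scanRepl]
  | succ n ih =>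
    intro cs hcs
    cases cs with
    | nil => rw [applyReps_nil, scanRepl]
    | cons c t =>
      by_cases h1 : List.isPrefixOf ['\\','\\','u','2','0','1','4'] (c :: t) = true
      · obtain ⟨r, hr⟩ := List.isPrefixOf_iff_prefix.mp h1
        have hlen : r.length ≤ n := by
          have := congrArg List.length hr
          simp at this hcs
          omega
        have hps : pvReps = [] ++ (['\\','\\','u','2','0','1','4'], ['—']) :: [(['\\','\\','u','2','0','1','3'], ['–']), (['\\','\\','u','2','0','1','9'], ['’']), (['\\','\\','u','0','0','2','B'], ['+']), (['\\','\\','n'], [' ']), (['\\','\\','r'], [' ']), (['\\','\\','u','0','0','2','7'], ['\''])] := by rfl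
        have hchain : applyReps pvReps (c :: t) = '—' :: applyReps pvReps r := by
          rw [← hr, hps]
          exact chain_match _ _ _ _ r (by decide) (by rintro kv ⟨⟩) (by intro kv hkv; fin_cases hkv <;> exact clash_of_clashb (by decide))
        have ht : List.drop 6 t = r := by
          simp only [List.cons_append, List.cons.injEq] at hr
          rw [← hr.2]
          simp
        rw [hchain, scanRepl]
        simp only [ if_pos h1, ht, ih r hlen]
      by_cases h2 : List.isPrefixOf ['\\','\\','u','2','0','1','3'] (c :: t) = true
      · obtain ⟨r, hr⟩ := List.isPrefixOf_iff_prefix.mp h2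
        have hlen : r.length ≤ n := by
          have := congrArg List.length hr
          simp at this hcs
          omega
        have hps : pvReps = [(['\\','\\','u','2','0','1','4'], ['—'])] ++ (['\\','\\','u','2','0','1','3'], ['–']) :: [(['\\','\\','u','2','0','1','9'], ['’']), (['\\','\\','u','0','0','2','B'], ['+']), (['\\','\\','n'], [' ']), (['\\','\\','r'], [' ']), (['\\','\\','u','0','0','2','7'], ['\''])] := by rfl
        have hchain : applyReps pvReps (c :: t) = '–' :: applyReps pvReps r := by
          rw [← hr, hps]
          exact chain_match _ _ _ _ r (by decide) (by intro kv hkv; fin_cases hkv <;> exact clash_of_clashb (by decide)) (by intro kv hkv; fin_cases hkv <;> exact clash_of_clashb (by decide))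
        have ht : List.drop 6 t = r := by
          simp only [List.cons_append, List.cons.injEq] at hr
          rw [← hr.2]
          simp
        rw [hchain, scanRepl]
        simp only [if_neg h1, if_pos h2, ht, ih r hlen]
      by_cases h3 : List.isPrefixOf ['\\','\\','u','2','0','1','9'] (c :: t) = true
      · obtain ⟨r, hr⟩ := List.isPrefixOf_iff_prefix.mp h3
        have hlen : r.length ≤ n := by
          have := congrArg List.length hr
          simp at this hcs
          omega
        have hps : pvReps = [(['\\','\\','u','2','0','1','4'], ['—']), (['\\','\\','u','2','0','1','3'], ['–'])] ++ (['\\','\\','u','2','0','1','9'], ['’']) :: [(['\\','\\','u','0','0','2','B'], ['+']), (['\\','\\','n'], [' ']), (['\\','\\','r'], [' ']), (['\\','\\','u','0','0','2','7'], ['\''])] := by rfl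
        have hchain : applyReps pvReps (c :: t) = '’' :: applyReps pvReps r := by
          rw [← hr, hps]
          exact chain_match _ _ _ _ r (by decide) (by intro kv hkv; fin_cases hkv <;> exact clash_of_clashb (by decide)) (by intro kv hkv; fin_cases hkv <;> exact clash_of_clashb (by decide))
        have ht : List.drop 6 t = r := by
          simp only [List.cons_append, List.cons.injEq] at hr
          rw [← hr.2]
          simp
        rw [hchain, scanRepl]
        simp only [if_neg h1, if_neg h2, if_pos h3, ht, ih r hlen]
      by_cases h4 : List.isPrefixOf ['\\','\\','u','0','0','2','B'] (c :: t) = true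
      · obtain ⟨r, hr⟩ := List.isPrefixOf_iff_prefix.mp h4
        have hlen : r.length ≤ n := by
          have := congrArg List.length hr
          simp at this hcs
          omega
        have hps : pvReps = [(['\\','\\','u','2','0','1','4'], ['—']), (['\\','\\','u','2','0','1','3'], ['–']), (['\\','\\','u','2','0','1','9'], ['’'])] ++ (['\\','\\','u','0','0','2','B'], ['+']) :: [(['\\','\\','n'], [' ']), (['\\','\\','r'], [' ']), (['\\','\\','u','0','0','2','7'], ['\''])] := by rfl
        have hchain : applyReps pvReps (c :: t) = '+' :: applyReps pvReps r := by
          rw [← hr, hps]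
          exact chain_match _ _ _ _ r (by decide) (by intro kv hkv; fin_cases hkv <;> exact clash_of_clashb (by decide)) (by intro kv hkv; fin_cases hkv <;> exact clash_of_clashb (by decide))
        have ht : List.drop 6 t = r := by
          simp only [List.cons_append, List.cons.injEq] at hr
          rw [← hr.2]
          simp
        rw [hchain, scanRepl]
        simp only [if_neg h1, if_neg h2, if_neg h3, if_pos h4, ht, ih r hlen]
      by_cases h5 : List.isPrefixOf ['\\','\\','n'] (c :: t) = true
      · obtain ⟨r, hr⟩ := List.isPrefixOf_iff_prefix.mp h5
        have hlen : r.length ≤ n := by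
          have := congrArg List.length hr
          simp at this hcs
          omega
        have hps : pvReps = [(['\\','\\','u','2','0','1','4'], ['—']), (['\\','\\','u','2','0','1','3'], ['–']), (['\\','\\','u','2','0','1','9'], ['’']), (['\\','\\','u','0','0','2','B'], ['+'])] ++ (['\\','\\','n'], [' ']) :: [(['\\','\\','r'], [' ']), (['\\','\\','u','0','0','2','7'], ['\''])] := by rfl
        have hchain : applyReps pvReps (c :: t) = ' ' :: applyReps pvReps r := by
          rw [← hr, hps]
          exact chain_match _ _ _ _ r (by decide) (by intro kv hkv; fin_cases hkv <;> exact clash_of_clashb (by decide)) (by intro kv hkv; fin_cases hkv <;> exact clash_of_clashb (by decide))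
        have ht : List.drop 2 t = r := by
          simp only [List.cons_append, List.cons.injEq] at hr
          rw [← hr.2]
          simp
        rw [hchain, scanRepl]
        simp only [if_neg h1, if_neg h2, if_neg h3, if_neg h4, if_pos h5, ht, ih r hlen]
      by_cases h6 : List.isPrefixOf ['\\','\\','r'] (c :: t) = true
      · obtain ⟨r, hr⟩ := List.isPrefixOf_iff_prefix.mp h6
        have hlen : r.length ≤ n := by
          have := congrArg List.length hr
          simp at this hcs
          omega
        have hps : pvReps = [(['\\','\\','u','2','0','1','4'], ['—']), (['\\','\\','u','2','0','1','3'], ['–']), (['\\','\\','u','2','0','1','9'], ['’']), (['\\','\\','u','0','0','2','B'], ['+']), (['\\','\\','n'], [' '])] ++ (['\\','\\','r'], [' ']) :: [(['\\','\\','u','0','0','2','7'], ['\''])] := by rfl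
        have hchain : applyReps pvReps (c :: t) = ' ' :: applyReps pvReps r := by
          rw [← hr, hps]
          exact chain_match _ _ _ _ r (by decide) (by intro kv hkv; fin_cases hkv <;> exact clash_of_clashb (by decide)) (by intro kv hkv; fin_cases hkv <;> exact clash_of_clashb (by decide))
        have ht : List.drop 2 t = r := by
          simp only [List.cons_append, List.cons.injEq] at hr
          rw [← hr.2]
          simp
        rw [hchain, scanRepl]
        simp only [if_neg h1, if_neg h2, if_neg h3, if_neg h4, if_neg h5, if_pos h6, ht, ih r hlen]
      by_cases h7 : List.isPrefixOf ['\\','\\','u','0','0','2','7'] (c :: t) = true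
      · obtain ⟨r, hr⟩ := List.isPrefixOf_iff_prefix.mp h7
        have hlen : r.length ≤ n := by
          have := congrArg List.length hr
          simp at this hcs
          omega
        have hps : pvReps = [(['\\','\\','u','2','0','1','4'], ['—']), (['\\','\\','u','2','0','1','3'], ['–']), (['\\','\\','u','2','0','1','9'], ['’']), (['\\','\\','u','0','0','2','B'], ['+']), (['\\','\\','n'], [' ']), (['\\','\\','r'], [' '])] ++ (['\\','\\','u','0','0','2','7'], ['\'']) :: [] := by rfl
        have hchain : applyReps pvReps (c :: t) = '\'' :: applyReps pvReps r := by
          rw [← hr, hps]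
          exact chain_match _ _ _ _ r (by decide) (by intro kv hkv; fin_cases hkv <;> exact clash_of_clashb (by decide)) (by rintro kv ⟨⟩)
        have ht : List.drop 6 t = r := by
          simp only [List.cons_append, List.cons.injEq] at hr
          rw [← hr.2]
          simp
        rw [hchain, scanRepl]
        simp only [if_neg h1, if_neg h2, if_neg h3, if_neg h4, if_neg h5, if_neg h6, if_pos h7, ht, ih r hlen]
      have hnp : ∀ kv ∈ pvReps, ¬ List.isPrefixOf kv.1 (c :: t) = true := by
        rintro ⟨kk, vv⟩ hkv
        simp only [pvReps, List.mem_cons, Prod.mk.injEq, List.not_mem_nil, or_false] at hkv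
        rcases hkv with ⟨rfl, rfl⟩ | ⟨rfl, rfl⟩ | ⟨rfl, rfl⟩ | ⟨rfl, rfl⟩ | ⟨rfl, rfl⟩ | ⟨rfl, rfl⟩ | ⟨rfl, rfl⟩
        exacts [h1, h2, h3, h4, h5, h6, h7]
      rw [cons_applyReps pvReps c t
        (by intro kv hkv; fin_cases hkv <;> exact ⟨by decide, by decide⟩)
        (by intro kv hkv kv' hkv' a ha hb; fin_cases hkv <;> fin_cases hkv' <;> simp_all) hnp, scanRepl]
      simp only [if_neg h1, if_neg h2, if_neg h3, if_neg h4, if_neg h5, if_neg h6, if_neg h7, ih t (by simp at hcs; omega)]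


-- string-level restatement of the main lemma for port A's replace chain
theorem strA_eq (v : String) :
    (PySem.Str.replace (PySem.Str.replace (PySem.Str.replace (PySem.Str.replace (PySem.Str.replace (PySem.Str.replace (PySem.Str.replace v "\\\\u2014" "—") "\\\\u2013" "–") "\\\\u2019" "’") "\\\\u002B" "+") "\\\\n" " ") "\\\\r" " ") "\\\\u0027" "'") = String.ofList (scanRepl v.toList) := by
  rw [← chain_eq_scan]
  have r1 : ∀ (s : List Char), PySem.Chars.replace s ("\\\\u2014" : String).toList ("—" : String).toList = rep ['\\','\\','u','2','0','1','4'] ['—'] s := by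
    intro s
    rw [show ("\\\\u2014" : String).toList = ['\\','\\','u','2','0','1','4'] from by decide,
      show ("—" : String).toList = ['—'] from by decide]
    exact replace_eq_rep s _ _ (by decide)
  have r2 : ∀ (s : List Char), PySem.Chars.replace s ("\\\\u2013" : String).toList ("–" : String).toList = rep ['\\','\\','u','2','0','1','3'] ['–'] s := by
    intro s
    rw [show ("\\\\u2013" : String).toList = ['\\','\\','u','2','0','1','3'] from by decide,
      show ("–" : String).toList = ['–'] from by decide]
    exact replace_eq_rep s _ _ (by decide)
  have r3 : ∀ (s : List Char), PySem.Chars.replace s ("\\\\u2019" : String).toList ("’" : String).toList = rep ['\\','\\','u','2','0','1','9'] ['’'] s := by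
    intro s
    rw [show ("\\\\u2019" : String).toList = ['\\','\\','u','2','0','1','9'] from by decide,
      show ("’" : String).toList = ['’'] from by decide]
    exact replace_eq_rep s _ _ (by decide)
  have r4 : ∀ (s : List Char), PySem.Chars.replace s ("\\\\u002B" : String).toList ("+" : String).toList = rep ['\\','\\','u','0','0','2','B'] ['+'] s := by
    intro s
    rw [show ("\\\\u002B" : String).toList = ['\\','\\','u','0','0','2','B'] from by decide,
      show ("+" : String).toList = ['+'] from by decide]
    exact replace_eq_rep s _ _ (by decide)
  have r5 : ∀ (s : List Char), PySem.Chars.replace s ("\\\\n" : String).toList (" " : String).toList = rep ['\\','\\','n'] [' '] s := by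
    intro s
    rw [show ("\\\\n" : String).toList = ['\\','\\','n'] from by decide,
      show (" " : String).toList = [' '] from by decide]
    exact replace_eq_rep s _ _ (by decide)
  have r6 : ∀ (s : List Char), PySem.Chars.replace s ("\\\\r" : String).toList (" " : String).toList = rep ['\\','\\','r'] [' '] s := by
    intro s
    rw [show ("\\\\r" : String).toList = ['\\','\\','r'] from by decide,
      show (" " : String).toList = [' '] from by decide]
    exact replace_eq_rep s _ _ (by decide)
  have r7 : ∀ (s : List Char), PySem.Chars.replace s ("\\\\u0027" : String).toList ("'" : String).toList = rep ['\\','\\','u','0','0','2','7'] ['\''] s := by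
    intro s
    rw [show ("\\\\u0027" : String).toList = ['\\','\\','u','0','0','2','7'] from by decide,
      show ("'" : String).toList = ['\''] from by decide]
    exact replace_eq_rep s _ _ (by decide)
  simp only [PySem.Str.replace, String.toList_ofList, r1, r2, r3, r4, r5, r6, r7]
  simp only [pvReps, applyReps]

-- ===== VERDICT (by name: the statement is the Claim_ definition above) =====
theorem decode_reasoning_spec : Claim_equal_decode_reasoning := by
  intro value _
  unfold Spec_decode_reasoning
  cases value with
  | none => rfl
  | some v =>
    by_cases hv : v = ""
    · simp [decode_reasoning, decode_reasoning_alt, hv]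
    · simp only [decode_reasoning, decode_reasoning_alt, if_neg hv]
      rw [strA_eq]
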